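-- pv_equiv track=rewrite | github.com/Bingurrr/BaekJoon_algo | programmers/124나라의 숫자.py | solution
-- ===== SOURCE A (Python) =====
-- def solution(n):
--     answer = ''
--     if n == 1 :
--         return '1'
--     cnt = 0
--     while n >= 1  :
--         num = n % 3
--         n = n//3 - (num == 0)
--
--         if num == 1 :
--             answer = '1' + answer
--         elif num == 2 :
--             answer = '2' + answer
--         else :
--             answer = '4' + answer
--     return answer
-- ===== SOURCE B (Python) =====
-- def solution(n):
--     if n < 1:
--         return ''
--     q, r = divmod(n - 1, 3)
--     return solution(q) + ('1' if r == 0 else '2' if r == 1 else '4')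
-- ===== Notes on version B (the rewrite author's own statement) =====
-- stated objective: simpler
-- what changed: Replaced the iterative loop with its zero-remainder quotient correction and the special-cased first branch by a short recursion peeling one bijective base-3 digit via divmod of the predecessor.
import Mathlib
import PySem

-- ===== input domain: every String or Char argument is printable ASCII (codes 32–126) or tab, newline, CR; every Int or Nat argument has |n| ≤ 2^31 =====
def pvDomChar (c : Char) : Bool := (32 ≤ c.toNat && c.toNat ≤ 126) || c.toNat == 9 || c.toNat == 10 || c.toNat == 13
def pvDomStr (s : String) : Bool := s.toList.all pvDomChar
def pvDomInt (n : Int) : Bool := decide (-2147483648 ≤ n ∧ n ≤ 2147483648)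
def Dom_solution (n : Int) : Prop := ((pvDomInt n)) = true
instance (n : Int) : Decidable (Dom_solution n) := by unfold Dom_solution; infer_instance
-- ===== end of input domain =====

-- B replaces the iterative loop with its `//3 - (num==0)` correction and the n==1 special case
-- by a short recursion peeling one bijective base-3 digit via divmod(n-1, 3); objective: simpler.


-- ===== PORT A =====
-- while-loop of A: num = n % 3; n = n//3 - (num == 0); prepend the digit
def solutionLoop (n : Int) (answer : String) : String :=
  if n ≥ 1 then
    solutionLoop (PySem.Int.floordiv n 3 - (if PySem.Int.mod n 3 == 0 then 1 else 0))
      ((if PySem.Int.mod n 3 == 1 then "1"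
        else if PySem.Int.mod n 3 == 2 then "2" else "4") ++ answer)
  else answer
termination_by n.toNat
decreasing_by
  rw [PySem.Int.floordiv_eq_ediv_of_pos (by norm_num), PySem.Int.mod_eq_emod_of_pos (by norm_num)]
  simp only [beq_iff_eq]
  split_ifs with h <;> omega

def solution (n : Int) : String :=
  if n == 1 then "1" else solutionLoop n ""

-- ===== PORT B =====
def solution_alt (n : Int) : String :=
  if n < 1 then "" else
    solution_alt (PySem.Int.floordiv (n - 1) 3) ++
      (if PySem.Int.mod (n - 1) 3 == 0 then "1"
       else if PySem.Int.mod (n - 1) 3 == 1 then "2" else "4")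
termination_by n.toNat
decreasing_by
  rw [PySem.Int.floordiv_eq_ediv_of_pos (by norm_num)]
  omega

-- ===== PRECONDITION & SPEC =====
def Spec_solution (n : Int) (out : String) : Prop := out = solution_alt n
instance (n : Int) (out : String) : Decidable (Spec_solution n out) := by unfold Spec_solution; infer_instance

-- ===== CLAIM (what is proved, stated in full; the proofs are below) =====
def Claim_equal_solution : Prop := ∀ (n : Int), Dom_solution n → Spec_solution n (solution n)

-- ===== LEMMAS AND PROOFS =====

theorem loop_eq_alt (k : Nat) : ∀ (n : Int), n.toNat ≤ k → ∀ (ans : String),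
    solutionLoop n ans = solution_alt n ++ ans := by
  induction k with
  | zero =>
    intro n h ans
    have hn : n < 1 := by omega
    rw [solutionLoop, solution_alt]
    simp [hn, not_le.mpr hn]
  | succ k ih =>
    intro n h ans
    rw [solutionLoop, solution_alt]
    by_cases hn : n ≥ 1
    · simp only [if_pos hn, if_neg (not_lt.mpr hn)]
      rw [PySem.Int.floordiv_eq_ediv_of_pos (a := n) (by norm_num),
          PySem.Int.mod_eq_emod_of_pos (a := n) (by norm_num),
          PySem.Int.floordiv_eq_ediv_of_pos (a := n - 1) (by norm_num),
          PySem.Int.mod_eq_emod_of_pos (a := n - 1) (by norm_num)]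
      have hq : n / 3 - (if (n % 3 : Int) == 0 then 1 else 0) = (n - 1) / 3 := by
        simp only [beq_iff_eq]; split_ifs with h0 <;> omega
      have hd : (if (n % 3 : Int) == 1 then "1" else if (n % 3 : Int) == 2 then "2" else "4")
          = (if ((n - 1) % 3 : Int) == 0 then "1" else if ((n - 1) % 3 : Int) == 1 then "2" else "4") := by
        simp only [beq_iff_eq]
        split_ifs <;> first | rfl | omega
      have hb : ((n - 1) / 3 : Int).toNat ≤ k := by omega
      rw [hq, hd, ih _ hb, String.append_assoc]
    · simp [hn, not_le.mp hn]

theorem solution_eq_alt (n : Int) : solution n = solution_alt n := by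
  rw [solution]
  by_cases h1 : n = 1
  · subst h1
    rw [solution_alt, solution_alt]
    norm_num [PySem.Int.floordiv, PySem.Int.mod]
  · simp only [beq_iff_eq, if_neg h1]
    simpa using loop_eq_alt n.toNat n le_rfl ""

-- ===== VERDICT (by name: the statement is the Claim_ definition above) =====
theorem solution_spec : Claim_equal_solution := by
  intro n _
  exact solution_eq_alt n
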